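-- pv_equiv track=rewrite | github.com/Au-TNT/harmony-generator | tools.py | DeleteIdenticals
-- ===== SOURCE A (Python) =====
-- def DeleteIdenticals(list:list, ordered:bool, sort=True): #ordered = True: do not delete list with identical items but in different order
--     i = 0
--     deleteNeeded = False
--     while i < len(list):
--         listCopy = [subList[:] for subList in list]
--         del listCopy[i]
--         for item in listCopy:
--             if ordered:
--                 if item == list[i]:
--                     deleteNeeded = True
--             elif not ordered:
--                 if sorted(item) == sorted(list[i]):
--                     deleteNeeded = True
--         if deleteNeeded:
--             del list[i]
--         else:
--             i = i + 1
--         deleteNeeded = False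
--     if sort:
--         i = 0
--         while i < len(list):
--             list[i].sort()
--             i = i + 1
--     return list
-- ===== SOURCE B (Python) =====
-- def DeleteIdenticals(list: list, ordered: bool, sort=True):
--     # Single reverse pass with a seen-set of canonical keys (keeps the LAST
--     # occurrence of each duplicate group), then one in-place sort pass.
--     # Mutates `list` in place (slice assignment + sublist .sort()), like A.
--     key = (lambda sub: tuple(sub)) if ordered else (lambda sub: tuple(sorted(sub)))
--     seen = set()
--     out = []
--     for sub in reversed(list):
--         k = key(sub)
--         if k not in seen:
--             seen.add(k)
--             out.append(sub)
--     out.reverse()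
--     if sort:
--         for sub in out:
--             sub.sort()
--     list[:] = out
--     return list
-- ===== Notes on version B (the rewrite author's own statement) =====
-- stated objective: faster
-- what changed: Replaced A's repeated whole-list rescans with per-step copies by a single reverse pass over the list using a set of canonical keys (tuple(sub) or tuple(sorted(sub))) that keeps the last occurrence of each duplicate group, then one sorting pass; mutation-in-place semantics preserved via list[:] = out.
import Mathlib
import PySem

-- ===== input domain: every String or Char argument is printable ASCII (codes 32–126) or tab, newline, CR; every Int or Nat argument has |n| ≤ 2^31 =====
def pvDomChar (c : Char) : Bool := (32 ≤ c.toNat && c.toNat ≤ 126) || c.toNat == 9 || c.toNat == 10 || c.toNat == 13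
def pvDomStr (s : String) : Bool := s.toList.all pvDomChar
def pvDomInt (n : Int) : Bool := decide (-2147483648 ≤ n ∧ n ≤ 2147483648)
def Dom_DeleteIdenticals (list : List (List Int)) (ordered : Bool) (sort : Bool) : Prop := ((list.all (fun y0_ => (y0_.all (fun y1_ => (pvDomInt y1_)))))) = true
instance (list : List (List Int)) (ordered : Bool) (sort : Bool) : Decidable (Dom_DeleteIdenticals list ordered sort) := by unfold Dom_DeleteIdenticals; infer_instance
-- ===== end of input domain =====

-- B deduplicates in one reverse pass with a seen-set of canonical keys instead of A's
-- repeated rescans-with-deletion (faster); both mutate the argument list in place in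
-- Python and the equivalence proved here is about the returned value.

-- ===== PORT A =====
-- the main while-loop of A: at index i, scan a copy of the list without position i
-- (Python's `[subList[:] for subList in list]` copies values only, so comparing against
-- `list.eraseIdx i` is value-exact) and delete list[i] if a duplicate is seen.
def pvALoop (ordered : Bool) (list : List (List Int)) (i : Nat) : List (List Int) :=
  if h : i < list.length then
    let cur := list[i]
    let listCopy := list.eraseIdx i
    let deleteNeeded := listCopy.foldl (fun d item =>
      if ordered then (if item = cur then true else d)
      else (if PySem.List.sorted item (fun x => x) false = PySem.List.sorted cur (fun x => x) false
            then true else d)) false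
    if deleteNeeded then pvALoop ordered (list.eraseIdx i) i
    else pvALoop ordered list (i + 1)
  else list
termination_by 2 * list.length - i
decreasing_by
  · have : (list.eraseIdx i).length = list.length - 1 := by
      simp [List.length_eraseIdx, h]
    omega
  · omega

-- A's second while-loop: list[i].sort() for each i
def pvASort (list : List (List Int)) (i : Nat) : List (List Int) :=
  if h : i < list.length then
    pvASort (list.set i (PySem.List.sorted list[i] (fun x => x) false)) (i + 1)
  else list
termination_by list.length - i
decreasing_by
  simp only [List.length_set]
  omega

def DeleteIdenticals (list : List (List Int)) (ordered : Bool) (sort : Bool) : List (List Int) :=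
  let l := pvALoop ordered list 0
  if sort then pvASort l 0 else l

-- ===== PORT B =====
def DeleteIdenticals_alt (list : List (List Int)) (ordered : Bool) (sort : Bool) : List (List Int) :=
  let key := fun (sub : List Int) =>
    if ordered then sub else PySem.List.sorted sub (fun x => x) false
  -- for sub in reversed(list): if key(sub) not in seen: seen.add; out.append(sub)
  let st := list.reverse.foldl
    (fun (st : PySem.Set (List Int) × List (List Int)) sub =>
      let k := key sub
      if k ∈ st.1 then st else (PySem.Set.add st.1 k, st.2 ++ [sub]))
    (PySem.Set.empty, [])
  let out := st.2.reverse
  if sort then out.map (fun sub => PySem.List.sorted sub (fun x => x) false) else out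

-- ===== PRECONDITION & SPEC =====
def Spec_DeleteIdenticals (list : List (List Int)) (ordered : Bool) (sort : Bool) (out : List (List Int)) : Prop := out = DeleteIdenticals_alt list ordered sort
instance (list : List (List Int)) (ordered : Bool) (sort : Bool) (out : List (List Int)) : Decidable (Spec_DeleteIdenticals list ordered sort out) := by unfold Spec_DeleteIdenticals; infer_instance

-- ===== CLAIM (what is proved, stated in full; the proofs are below) =====
def Claim_equal_DeleteIdenticals : Prop := ∀ (list : List (List Int)) (ordered : Bool) (sort : Bool), Dom_DeleteIdenticals list ordered sort → Spec_DeleteIdenticals list ordered sort (DeleteIdenticals list ordered sort)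

-- ===== LEMMAS AND PROOFS =====

-- canonical key of a sublist (proof-side abbreviation of what both programs compare)
def pvKey (ordered : Bool) (sub : List Int) : List Int :=
  if ordered then sub else PySem.List.sorted sub (fun x => x) false

-- B's loop body, named for the proofs (definitionally the port's step function)
def pvBStep (ordered : Bool) (sub : List Int) (st : PySem.Set (List Int) × List (List Int)) :
    PySem.Set (List Int) × List (List Int) :=
  if pvKey ordered sub ∈ st.1 then st else (PySem.Set.add st.1 (pvKey ordered sub), st.2 ++ [sub])

-- common specification: keep the last occurrence of each key-group
def pvKeepLast (ordered : Bool) : List (List Int) → List (List Int)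
  | [] => []
  | x :: xs =>
      if xs.any (fun y => pvKey ordered y = pvKey ordered x) then pvKeepLast ordered xs
      else x :: pvKeepLast ordered xs

theorem pvFlag_eq_any (ordered : Bool) (cur : List Int) :
    ∀ (l : List (List Int)) (b : Bool),
      l.foldl (fun d item =>
        if ordered then (if item = cur then true else d)
        else (if PySem.List.sorted item (fun x => x) false = PySem.List.sorted cur (fun x => x) false
              then true else d)) b
      = (b || l.any (fun y => pvKey ordered y = pvKey ordered cur)) := by
  intro l
  induction l with
  | nil => intro b; simp
  | cons x xs ih =>
      intro b
      rw [List.foldl_cons, ih]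
      cases ordered
      · by_cases h : PySem.List.sorted x (fun x => x) false = PySem.List.sorted cur (fun x => x) false
        · simp [pvKey, h]
        · simp [pvKey, h]
      · by_cases h : x = cur
        · simp [pvKey, h]
        · simp [pvKey, h]

theorem pvALoop_shift (ordered : Bool) :
    ∀ (n : Nat) (xs : List (List Int)) (x : List Int) (i : Nat),
      2 * xs.length - i < n →
      (∀ y ∈ xs, pvKey ordered y ≠ pvKey ordered x) →
      pvALoop ordered (x :: xs) (i + 1) = x :: pvALoop ordered xs i := by
  intro n
  induction n with
  | zero => intro xs x i h; omega
  | succ n ih =>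
      intro xs x i hm hk
      by_cases h : i < xs.length
      · have hlen : i + 1 < (x :: xs).length := by simp; omega
        conv_lhs => rw [pvALoop]
        conv_rhs => rw [pvALoop]
        rw [dif_pos hlen, dif_pos h]
        have hget : (x :: xs)[i + 1]'(by simpa using hlen) = xs[i] := by simp
        have herase : (x :: xs).eraseIdx (i + 1) = x :: xs.eraseIdx i := rfl
        simp only [hget, herase]
        rw [pvFlag_eq_any, pvFlag_eq_any]
        have hx : ¬ (pvKey ordered x = pvKey ordered xs[i]) := by
          intro he; exact hk xs[i] (List.getElem_mem h) he.symm
        simp only [List.any_cons, hx, decide_false, Bool.false_or]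
        split_ifs with hd
        · have hlen' : (xs.eraseIdx i).length = xs.length - 1 := by
            simp [List.length_eraseIdx, h]
          exact ih (xs.eraseIdx i) x i (by omega)
            (fun y hy => hk y (List.mem_of_mem_eraseIdx hy))
        · exact ih xs x (i + 1) (by omega) hk
      · have h1 : ¬ (i + 1 < (x :: xs).length) := by simp; omega
        conv_lhs => rw [pvALoop]
        conv_rhs => rw [pvALoop]
        rw [dif_neg h1, dif_neg h]

theorem pvALoop_eq_keepLast (ordered : Bool) :
    ∀ (l : List (List Int)), pvALoop ordered l 0 = pvKeepLast ordered l := by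
  intro l
  induction l with
  | nil =>
      rw [pvALoop, dif_neg (by simp : ¬ (0 < ([] : List (List Int)).length))]
      rfl
  | cons x xs ih =>
      have h0 : 0 < (x :: xs).length := by simp
      conv_lhs => rw [pvALoop]
      rw [dif_pos h0]
      have hget : (x :: xs)[0]'h0 = x := rfl
      have herase : (x :: xs).eraseIdx 0 = xs := rfl
      simp only [hget, herase]
      rw [pvFlag_eq_any]
      simp only [Bool.false_or, pvKeepLast]
      split_ifs with hd
      · exact ih
      · have hk : ∀ y ∈ xs, pvKey ordered y ≠ pvKey ordered x := by
          intro y hy he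
          exact hd (List.any_eq_true.mpr ⟨y, hy, by simp [he]⟩)
        rw [pvALoop_shift ordered (2 * xs.length + 1) xs x 0 (by omega) hk, ih]

theorem pvASort_shift :
    ∀ (n : Nat) (xs : List (List Int)) (x : List Int) (i : Nat),
      xs.length - i < n →
      pvASort (x :: xs) (i + 1) = x :: pvASort xs i := by
  intro n
  induction n with
  | zero => intro xs x i h; omega
  | succ n ih =>
      intro xs x i hm
      by_cases h : i < xs.length
      · have hlen : i + 1 < (x :: xs).length := by simp; omega
        conv_lhs => rw [pvASort]
        conv_rhs => rw [pvASort]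
        rw [dif_pos hlen, dif_pos h]
        have hget : (x :: xs)[i + 1]'(by simpa using hlen) = xs[i] := by simp
        have hset : (x :: xs).set (i + 1) (PySem.List.sorted xs[i] (fun x => x) false)
            = x :: xs.set i (PySem.List.sorted xs[i] (fun x => x) false) := rfl
        rw [hget, hset]
        exact ih _ x (i + 1) (by simp; omega)
      · have h1 : ¬ (i + 1 < (x :: xs).length) := by simp; omega
        conv_lhs => rw [pvASort]
        conv_rhs => rw [pvASort]
        rw [dif_neg h1, dif_neg h]

theorem pvASort_eq_map :
    ∀ (l : List (List Int)),
      pvASort l 0 = l.map (fun sub => PySem.List.sorted sub (fun x => x) false) := by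
  intro l
  induction l with
  | nil =>
      rw [pvASort, dif_neg (by simp : ¬ (0 < ([] : List (List Int)).length))]
      rfl
  | cons x xs ih =>
      have h0 : 0 < (x :: xs).length := by simp
      conv_lhs => rw [pvASort]
      rw [dif_pos h0]
      have hset : (x :: xs).set 0 (PySem.List.sorted ((x :: xs)[0]'h0) (fun x => x) false)
          = PySem.List.sorted x (fun x => x) false :: xs := rfl
      rw [hset, pvASort_shift (xs.length + 1) xs _ 0 (by omega), ih]
      simp

theorem pvAltFoldr (ordered : Bool) :
    ∀ (l : List (List Int)),
      (∀ k, k ∈ (l.foldr (pvBStep ordered) (PySem.Set.empty, [])).1 ↔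
        ∃ y ∈ l, pvKey ordered y = k) ∧
      (l.foldr (pvBStep ordered) (PySem.Set.empty, [])).2 = (pvKeepLast ordered l).reverse := by
  intro l
  induction l with
  | nil => simp [PySem.Set.empty, pvKeepLast]
  | cons x xs ih =>
      obtain ⟨ihm, iho⟩ := ih
      rw [List.foldr_cons]
      by_cases hmem : pvKey ordered x ∈ (xs.foldr (pvBStep ordered) (PySem.Set.empty, [])).1
      · have hdup : ∃ y ∈ xs, pvKey ordered y = pvKey ordered x := (ihm _).mp hmem
        have hstep : pvBStep ordered x (xs.foldr (pvBStep ordered) (PySem.Set.empty, []))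
            = xs.foldr (pvBStep ordered) (PySem.Set.empty, []) := by
          rw [pvBStep, if_pos hmem]
        rw [hstep]
        refine ⟨fun k => ?_, ?_⟩
        · rw [ihm k]
          constructor
          · rintro ⟨y, hy, he⟩; exact ⟨y, List.mem_cons_of_mem _ hy, he⟩
          · rintro ⟨y, hy, he⟩
            rcases List.mem_cons.mp hy with rfl | hy'
            · exact he ▸ hdup
            · exact ⟨y, hy', he⟩
        · rw [iho]
          have hany : xs.any (fun y => pvKey ordered y = pvKey ordered x) = true := by
            obtain ⟨y, hy, he⟩ := hdup
            exact List.any_eq_true.mpr ⟨y, hy, by simp [he]⟩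
          simp [pvKeepLast, hany]
      · have hnodup : ¬ ∃ y ∈ xs, pvKey ordered y = pvKey ordered x :=
          fun hh => hmem ((ihm _).mpr hh)
        have hstep : pvBStep ordered x (xs.foldr (pvBStep ordered) (PySem.Set.empty, []))
            = (PySem.Set.add (xs.foldr (pvBStep ordered) (PySem.Set.empty, [])).1 (pvKey ordered x),
               (xs.foldr (pvBStep ordered) (PySem.Set.empty, [])).2 ++ [x]) := by
          rw [pvBStep, if_neg hmem]
        rw [hstep]
        refine ⟨fun k => ?_, ?_⟩
        · simp only
          rw [PySem.Set.mem_add, ihm k]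
          constructor
          · rintro (⟨y, hy, he⟩ | rfl)
            · exact ⟨y, List.mem_cons_of_mem _ hy, he⟩
            · exact ⟨x, List.mem_cons_self, rfl⟩
          · rintro ⟨y, hy, he⟩
            rcases List.mem_cons.mp hy with rfl | hy'
            · exact Or.inr he.symm
            · exact Or.inl ⟨y, hy', he⟩
        · simp only
          rw [iho]
          have hany : xs.any (fun y => pvKey ordered y = pvKey ordered x) = false := by
            rw [List.any_eq_false]
            intro y hy
            simp only [decide_eq_true_eq]
            exact fun he => hnodup ⟨y, hy, he⟩
          simp [pvKeepLast, hany]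

theorem pvAlt_eq (list : List (List Int)) (ordered : Bool) (sort : Bool) :
    DeleteIdenticals_alt list ordered sort
      = if sort then (pvKeepLast ordered list).map (fun sub => PySem.List.sorted sub (fun x => x) false)
        else pvKeepLast ordered list := by
  simp only [DeleteIdenticals_alt]
  rw [List.foldl_reverse]
  have hstep : (fun (sub : List Int) (st : PySem.Set (List Int) × List (List Int)) =>
      (fun (st : PySem.Set (List Int) × List (List Int)) (sub : List Int) =>
        let k := if ordered then sub else PySem.List.sorted sub (fun x => x) false
        if k ∈ st.1 then st else (PySem.Set.add st.1 k, st.2 ++ [sub])) st sub)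
      = pvBStep ordered := rfl
  rw [hstep, (pvAltFoldr ordered list).2, List.reverse_reverse]

theorem DeleteIdenticals_spec : Claim_equal_DeleteIdenticals := by
  intro list ordered sort _
  unfold Spec_DeleteIdenticals
  rw [pvAlt_eq]
  unfold DeleteIdenticals
  rw [pvALoop_eq_keepLast]
  by_cases hs : sort <;> simp [hs, pvASort_eq_map]
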